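-- pv_equiv track=rewrite | github.com/JLT-inki/Advent_of_Code_2023 | day13/solver.py | check_split_vertically
-- ===== SOURCE A (Python) =====
-- def check_split_vertically(left_split: list[str], right_split: list[str],
--                            part_2: bool) -> bool:
--     if part_2:
--         number_of_smudges: int = 0
--
--     for line_left, line_right in zip(left_split, right_split):
--         for char_left, char_right in zip(reversed(line_left), line_right):
--             if char_left != char_right:
--                 if not part_2 or number_of_smudges != 0:
--                     return False
--                 number_of_smudges = 1
--
--     if not part_2 or number_of_smudges == 1:
--         return True
--     return False
-- ===== SOURCE B (Python) =====
-- def check_split_vertically(left_split: list[str], right_split: list[str],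
--                            part_2: bool) -> bool:
--     # Stage 1: align each row pair as equal-length strings (mirror-reversed left vs right).
--     rows = []
--     for ll, lr in zip(left_split, right_split):
--         m = min(len(ll), len(lr))
--         rows.append((ll[::-1][:m], lr[:m]))
--     # Stage 2: keep only the rows that are not exact mirror images.
--     diffs = [(a, b) for a, b in rows if a != b]
--     if not part_2:
--         return not diffs
--     # Part 2: a valid smudged mirror has exactly one differing row, and that row
--     # must match exactly after repairing its first mismatching character.
--     if len(diffs) != 1:
--         return False
--     a, b = diffs[0]
--     j = next(i for i in range(len(a)) if a[i] != b[i])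
--     return a[j + 1:] == b[j + 1:]
-- ===== Notes on version B (the rewrite author's own statement) =====
-- stated objective: alternative
-- what changed: Instead of scanning characters with a smudge counter and early returns, B compares whole rows as strings: it builds the aligned row pairs, filters the rows that are not exact mirror images, and decides part 1 by that list being empty and part 2 by it containing exactly one row whose suffix after the first mismatching character matches (i.e. a single-character smudge), with no character-mismatch counting at all.
import Mathlib
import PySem

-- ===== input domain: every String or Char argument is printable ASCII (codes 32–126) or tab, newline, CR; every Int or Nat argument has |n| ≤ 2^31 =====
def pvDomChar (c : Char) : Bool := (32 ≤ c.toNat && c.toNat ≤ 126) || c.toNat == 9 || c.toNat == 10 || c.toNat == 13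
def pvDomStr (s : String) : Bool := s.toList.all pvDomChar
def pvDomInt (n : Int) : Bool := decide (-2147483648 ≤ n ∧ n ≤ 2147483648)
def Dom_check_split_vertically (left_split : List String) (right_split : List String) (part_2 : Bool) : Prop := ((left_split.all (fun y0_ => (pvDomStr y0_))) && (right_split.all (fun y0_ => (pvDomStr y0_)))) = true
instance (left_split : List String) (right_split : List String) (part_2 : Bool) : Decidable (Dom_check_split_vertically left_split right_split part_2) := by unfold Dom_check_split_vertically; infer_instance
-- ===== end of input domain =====

-- B replaces A's char-by-char smudge counter and early returns by whole-row string
-- comparison: filter the non-mirrored rows, then decide by emptiness (part 1) or by a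
-- single row that matches after repairing its first mismatching character (part 2).


-- ===== PORT A =====
-- inner loop of A over zip(reversed(line_left), line_right); state = number_of_smudges;
-- 'none' = early 'return False'
def pvInnerA (part_2 : Bool) : List (Char × Char) → Int → Option Int
  | [], s => some s
  | (cl, cr) :: rest, s =>
    if cl ≠ cr then
      if !part_2 || s ≠ 0 then none
      else pvInnerA part_2 rest 1
    else pvInnerA part_2 rest s

-- outer loop of A over zip(left_split, right_split)
def pvOuterA (part_2 : Bool) : List (String × String) → Int → Option Int
  | [], s => some s
  | (ll, lr) :: rest, s =>
    match pvInnerA part_2 ((ll.toList.reverse).zip lr.toList) s with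
    | none => none
    | some s' => pvOuterA part_2 rest s'

def check_split_vertically (left_split : List String) (right_split : List String) (part_2 : Bool) : Bool :=
  match pvOuterA part_2 (left_split.zip right_split) 0 with
  | none => false
  | some s => !part_2 || s == 1

-- ===== PORT B =====
-- one aligned row pair: ll[::-1][:m] and lr[:m] with m = min(len(ll), len(lr))
def pvRow (q : String × String) : List Char × List Char :=
  let a := q.1.toList.reverse
  let b := q.2.toList
  let m := min a.length b.length
  (a.take m, b.take m)

-- 'j = next(i for i in range(len(a)) if a[i] != b[i]); return a[j+1:] == b[j+1:]'
-- for equal-length lists: find the first mismatch, tails after it must be equal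
def pvFixOne : List Char → List Char → Bool
  | x :: xs, y :: ys => if x ≠ y then xs == ys else pvFixOne xs ys
  | _, _ => false

def pvSingleFix : List (List Char × List Char) → Bool
  | [q] => pvFixOne q.1 q.2
  | _ => false

def check_split_vertically_alt (left_split : List String) (right_split : List String) (part_2 : Bool) : Bool :=
  let rows := (left_split.zip right_split).map pvRow
  let diffs := rows.filter (fun q => q.1 ≠ q.2)
  if !part_2 then diffs.isEmpty
  else pvSingleFix diffs

-- ===== PRECONDITION & SPEC =====
def Spec_check_split_vertically (left_split : List String) (right_split : List String) (part_2 : Bool) (out : Bool) : Prop := out = check_split_vertically_alt left_split right_split part_2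
instance (left_split : List String) (right_split : List String) (part_2 : Bool) (out : Bool) : Decidable (Spec_check_split_vertically left_split right_split part_2 out) := by unfold Spec_check_split_vertically; infer_instance

-- ===== CLAIM (what is proved, stated in full; the proofs are below) =====
def Claim_equal_check_split_vertically : Prop := ∀ (left_split : List String) (right_split : List String) (part_2 : Bool), Dom_check_split_vertically left_split right_split part_2 → Spec_check_split_vertically left_split right_split part_2 (check_split_vertically left_split right_split part_2)

-- ===== LEMMAS AND PROOFS =====

-- mismatch count of one char-pair list
def pvCnt (pr : List (Char × Char)) : Nat := pr.countP (fun pc => pc.1 ≠ pc.2)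

lemma innerA_false (pr : List (Char × Char)) (s : Int) :
    pvInnerA false pr s = if pvCnt pr = 0 then some s else none := by
  induction pr generalizing s with
  | nil => simp [pvInnerA, pvCnt]
  | cons hd tl ih =>
    obtain ⟨cl, cr⟩ := hd
    by_cases h : cl = cr <;> simp [pvInnerA, pvCnt, h, ih]

lemma innerA_true (pr : List (Char × Char)) (s : Int) :
    pvInnerA true pr s =
      if s ≠ 0 then (if pvCnt pr = 0 then some s else none)
      else (if pvCnt pr ≤ 1 then some (pvCnt pr : Int) else none) := by
  induction pr generalizing s with
  | nil => by_cases hs : s = 0 <;> simp [pvInnerA, pvCnt, hs]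
  | cons hd tl ih =>
    obtain ⟨cl, cr⟩ := hd
    by_cases h : cl = cr
    · simp [pvInnerA, pvCnt, h, ih]
    · have hcnt : pvCnt ((cl, cr) :: tl) = pvCnt tl + 1 := by simp [pvCnt, h]
      by_cases hs : s = 0
      · have hstep : pvInnerA true ((cl, cr) :: tl) s = pvInnerA true tl 1 := by
          simp [pvInnerA, h, hs]
        rw [hstep, ih, hcnt]
        rcases Nat.eq_zero_or_pos (pvCnt tl) with h0 | h0
        · simp [h0, hs]
        · have hne : pvCnt tl ≠ 0 := by omega
          have h2 : ¬ pvCnt tl + 1 ≤ 1 := by omega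
          simp [hne, h2, hs]
      · have hstep : pvInnerA true ((cl, cr) :: tl) s = none := by
          simp [pvInnerA, h, hs]
        rw [hstep, hcnt]
        simp [hs]

-- total mismatch count over string pairs
def pvTot (L : List (String × String)) : Nat :=
  (L.map (fun q => pvCnt ((q.1.toList.reverse).zip q.2.toList))).sum

lemma outerA_false (L : List (String × String)) (s : Int) :
    pvOuterA false L s = if pvTot L = 0 then some s else none := by
  induction L generalizing s with
  | nil => simp [pvOuterA, pvTot]
  | cons hd tl ih =>
    obtain ⟨ll, lr⟩ := hd
    simp [pvOuterA, innerA_false, pvTot]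
    rcases Nat.eq_zero_or_pos (pvCnt ((ll.toList.reverse).zip lr.toList)) with h0 | h0
    · simp [h0, ih, pvTot]
    · have hne : pvCnt ((ll.toList.reverse).zip lr.toList) ≠ 0 := by omega
      simp [hne]

lemma outerA_true (L : List (String × String)) (s : Int) :
    pvOuterA true L s =
      if s ≠ 0 then (if pvTot L = 0 then some s else none)
      else (if pvTot L ≤ 1 then some (pvTot L : Int) else none) := by
  induction L generalizing s with
  | nil => by_cases hs : s = 0 <;> simp [pvOuterA, pvTot, hs]
  | cons hd tl ih =>
    obtain ⟨ll, lr⟩ := hd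
    set c := pvCnt ((ll.toList.reverse).zip lr.toList) with hc
    have htot : pvTot ((ll, lr) :: tl) = c + pvTot tl := by simp [pvTot, hc, pvCnt]
    by_cases hs : s = 0
    · simp [pvOuterA, innerA_true, hs, ← hc, htot]
      rcases hcase : c with _ | _ | n
      · simp [ih]
      · simp [ih]
        split <;> rename_i h <;> simp [h]
      · have h1 : ¬ (n + 1 + 1 ≤ 1) := by omega
        simp [h1]
        omega
    · simp [pvOuterA, innerA_true, hs, ← hc, htot]
      rcases Nat.eq_zero_or_pos c with h0 | h0
      · simp [h0, ih, hs]
      · have hne : c ≠ 0 := by omega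
        simp [hne]

-- zip already truncates to the shorter list, so taking min-length prefixes first is a no-op
lemma zip_take_min (x y : List Char) :
    ((x.take (min x.length y.length)).zip (y.take (min x.length y.length))) = x.zip y := by
  induction x generalizing y with
  | nil => simp
  | cons a xs ih =>
    cases y with
    | nil => simp
    | cons b ys =>
      simp only [List.length_cons, Nat.succ_min_succ, List.take_succ_cons, List.zip_cons_cons]
      rw [ih]

-- for equal-length lists, zero mismatches means equality
lemma cnt_zero_iff (a b : List Char) (h : a.length = b.length) :
    pvCnt (a.zip b) = 0 ↔ a = b := by
  induction a generalizing b with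
  | nil => cases b with
    | nil => simp [pvCnt]
    | cons y ys => simp at h
  | cons x xs ih =>
    cases b with
    | nil => simp at h
    | cons y ys =>
      have h' : xs.length = ys.length := by simpa using h
      by_cases hxy : x = y <;> simp [pvCnt, hxy, ← ih ys h', pvCnt]

-- for equal-length lists, pvFixOne holds exactly when there is exactly one mismatch
lemma fixone_iff (a b : List Char) (h : a.length = b.length) :
    pvFixOne a b = true ↔ pvCnt (a.zip b) = 1 := by
  induction a generalizing b with
  | nil => cases b with
    | nil => simp [pvFixOne, pvCnt]
    | cons y ys => simp at h
  | cons x xs ih =>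
    cases b with
    | nil => simp at h
    | cons y ys =>
      have h' : xs.length = ys.length := by simpa using h
      by_cases hxy : x = y
      · simp [pvFixOne, pvCnt, hxy, ih ys h', pvCnt]
      · simp [pvFixOne, pvCnt, hxy, ← cnt_zero_iff xs ys h', pvCnt]

-- sum of per-row mismatch counts over the aligned rows
def pvS (L : List (List Char × List Char)) : Nat :=
  (L.map (fun q => pvCnt (q.1.zip q.2))).sum

lemma filter_nil_iff (L : List (List Char × List Char))
    (h : ∀ q ∈ L, q.1.length = q.2.length) :
    (L.filter (fun q => q.1 ≠ q.2)).isEmpty = true ↔ pvS L = 0 := by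
  induction L with
  | nil => simp [pvS]
  | cons q tl ih =>
    have hq : q.1.length = q.2.length := h q (by simp)
    have htl : ∀ p ∈ tl, p.1.length = p.2.length := fun p hp => h p (by simp [hp])
    have hS : pvS (q :: tl) = pvCnt (q.1.zip q.2) + pvS tl := by simp [pvS]
    by_cases he : q.1 = q.2
    · have hc0 : pvCnt (q.1.zip q.2) = 0 := (cnt_zero_iff q.1 q.2 hq).mpr he
      have hfil : (q :: tl).filter (fun p => decide (p.1 ≠ p.2)) =
          tl.filter (fun p => decide (p.1 ≠ p.2)) := List.filter_cons_of_neg (by simp [he])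
      rw [hfil, hS, hc0]
      simpa using ih htl
    · have hc : pvCnt (q.1.zip q.2) ≠ 0 := fun h0 => he ((cnt_zero_iff q.1 q.2 hq).mp h0)
      have hfil : (q :: tl).filter (fun p => decide (p.1 ≠ p.2)) =
          q :: tl.filter (fun p => decide (p.1 ≠ p.2)) := List.filter_cons_of_pos (by simp [he])
      rw [hfil, hS]
      simp only [List.isEmpty_cons, Bool.false_eq_true, false_iff]
      omega

lemma filter_one_iff (L : List (List Char × List Char))
    (h : ∀ q ∈ L, q.1.length = q.2.length) :
    pvSingleFix (L.filter (fun q => q.1 ≠ q.2)) = true ↔ pvS L = 1 := by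
  induction L with
  | nil => simp [pvS, pvSingleFix]
  | cons q tl ih =>
    have hq : q.1.length = q.2.length := h q (by simp)
    have htl : ∀ p ∈ tl, p.1.length = p.2.length := fun p hp => h p (by simp [hp])
    have hS : pvS (q :: tl) = pvCnt (q.1.zip q.2) + pvS tl := by simp [pvS]
    by_cases he : q.1 = q.2
    · have hc0 : pvCnt (q.1.zip q.2) = 0 := (cnt_zero_iff q.1 q.2 hq).mpr he
      have hfil : (q :: tl).filter (fun p => decide (p.1 ≠ p.2)) =
          tl.filter (fun p => decide (p.1 ≠ p.2)) := List.filter_cons_of_neg (by simp [he])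
      rw [hfil, hS, hc0]
      simpa using ih htl
    · have hc : pvCnt (q.1.zip q.2) ≠ 0 := fun h0 => he ((cnt_zero_iff q.1 q.2 hq).mp h0)
      have hfil : (q :: tl).filter (fun p => decide (p.1 ≠ p.2)) =
          q :: tl.filter (fun p => decide (p.1 ≠ p.2)) := List.filter_cons_of_pos (by simp [he])
      rw [hfil, hS]
      cases hcase : tl.filter (fun p => decide (p.1 ≠ p.2)) with
      | nil =>
        have htl0 : pvS tl = 0 := (filter_nil_iff tl htl).mp (by rw [hcase]; rfl)
        rw [htl0]
        have hred : pvSingleFix [q] = pvFixOne q.1 q.2 := rfl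
        rw [hred, fixone_iff q.1 q.2 hq]
        omega
      | cons q2 tl2 =>
        have htl0 : pvS tl ≠ 0 := by
          intro h0
          have hemp := (filter_nil_iff tl htl).mpr h0
          rw [hcase] at hemp
          simp at hemp
        have hred : pvSingleFix (q :: q2 :: tl2) = false := rfl
        rw [hred]
        simp only [Bool.false_eq_true, false_iff]
        omega

-- each aligned row has equal-length components, and rows preserve the total count
lemma row_len (q : String × String) : (pvRow q).1.length = (pvRow q).2.length := by
  simp [pvRow]

lemma row_cnt (q : String × String) :
    pvCnt ((pvRow q).1.zip (pvRow q).2) = pvCnt ((q.1.toList.reverse).zip q.2.toList) := by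
  simp only [pvRow]
  rw [zip_take_min]

lemma S_rows (L : List (String × String)) : pvS (L.map pvRow) = pvTot L := by
  induction L with
  | nil => simp [pvS, pvTot]
  | cons q tl ih =>
    simp [pvS, pvTot] at ih ⊢
    rw [row_cnt q]
    omega

-- B's result characterised by the total mismatch count
lemma altB_char (l r : List String) (p : Bool) :
    check_split_vertically_alt l r p =
      (if p then decide (pvTot (l.zip r) = 1) else decide (pvTot (l.zip r) = 0)) := by
  have hrows : ∀ q ∈ (l.zip r).map pvRow, q.1.length = q.2.length := by
    intro q hq
    obtain ⟨p', _, rfl⟩ := List.mem_map.mp hq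
    exact row_len p'
  cases p with
  | false =>
    simp only [check_split_vertically_alt, Bool.not_false, if_true]
    have hiff := filter_nil_iff ((l.zip r).map pvRow) hrows
    rw [S_rows] at hiff
    by_cases h0 : pvTot (l.zip r) = 0
    · rw [hiff.mpr h0]
      simp [h0]
    · have : ¬ ((((l.zip r).map pvRow).filter (fun q => q.1 ≠ q.2)).isEmpty = true) :=
        fun h => h0 (hiff.mp h)
      rw [Bool.not_eq_true] at this
      rw [this]
      simp [h0]
  | true =>
    simp only [check_split_vertically_alt, Bool.not_true, Bool.false_eq_true, if_false, if_true]
    have hiff := filter_one_iff ((l.zip r).map pvRow) hrows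
    rw [S_rows] at hiff
    by_cases h1 : pvTot (l.zip r) = 1
    · rw [hiff.mpr h1]
      simp [h1]
    · have : ¬ (pvSingleFix (((l.zip r).map pvRow).filter (fun q => q.1 ≠ q.2)) = true) :=
        fun h => h1 (hiff.mp h)
      rw [Bool.not_eq_true] at this
      rw [this]
      simp [h1]

-- ===== VERDICT (by name: the statement is the Claim_ definition above) =====
theorem check_split_vertically_spec : Claim_equal_check_split_vertically := by
  intro l r p _
  unfold Spec_check_split_vertically check_split_vertically
  rw [altB_char]
  cases p with
  | false =>
    rw [outerA_false]
    by_cases h0 : pvTot (l.zip r) = 0 <;> simp [h0]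
  | true =>
    rw [outerA_true]
    simp only [ne_eq, not_true_eq_false, if_false, if_true]
    rcases hcase : pvTot (l.zip r) with _ | _ | n
    · simp
    · simp
    · have h1 : ¬ (n + 1 + 1 ≤ 1) := by omega
      simp [h1]
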